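-- pv_equiv track=rewrite | github.com/Orinav/Python | ממן 12 - 100/mmn12.py | biggest_sum
-- ===== SOURCE A (Python) =====
-- def biggest_sum(lst):
--     '''
--     Description:
--     The function will get a list and will return the biggest sum of numbers inside the list that are between two zeros.
--
--     Parameters:
--     lst - List.
--
--     Variables:
--     current_sum - The current sum between two zeros.
--     max_sum - The biggest sum between two zeros.
--     zero_flag - Will be False if we didn't encounter any zero, True otherwise.
--
--     Output:
--     If the input is invalid - The function will raise TypeError message.
--     If the input is valid - The function will return the biggest sum of numbers inside the list that are between two zeros.
--     '''
--     for element in lst: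
--         if type(element) != int or element < 0:
--                 raise TypeError("All the elements in lst must be an integers that are bigger or equal to 0")
--
--     current_sum = 0
--     max_sum = 0
--     zero_flag = False
--
--     for element in lst:
--         if element == 0 and zero_flag == False:
--             zero_flag = True
--             continue
--         elif element == 0 and zero_flag == True:
--             max_sum = max(max_sum, current_sum)
--             current_sum = 0
--             continue
--
--         if zero_flag == True:
--             current_sum += element
--
--     return max_sum
-- ===== SOURCE B (Python) =====
-- def biggest_sum(lst):
--     for element in lst:
--         if type(element) != int or element < 0:
--             raise TypeError("All the elements in lst must be an integers that are bigger or equal to 0")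
--     if 0 not in lst:
--         return 0
--     rest = lst[lst.index(0) + 1:]
--     best = 0
--     while 0 in rest:
--         j = rest.index(0)
--         best = max(best, sum(rest[:j]))
--         rest = rest[j + 1:]
--     return best
-- ===== Notes on version B (the rewrite author's own statement) =====
-- stated objective: alternative
-- what changed: Replaces A's single-pass flag/current_sum/max_sum state machine by a loop that repeatedly finds the next zero with list.index and takes max over sum of the slice between consecutive zeros.
import Mathlib
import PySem

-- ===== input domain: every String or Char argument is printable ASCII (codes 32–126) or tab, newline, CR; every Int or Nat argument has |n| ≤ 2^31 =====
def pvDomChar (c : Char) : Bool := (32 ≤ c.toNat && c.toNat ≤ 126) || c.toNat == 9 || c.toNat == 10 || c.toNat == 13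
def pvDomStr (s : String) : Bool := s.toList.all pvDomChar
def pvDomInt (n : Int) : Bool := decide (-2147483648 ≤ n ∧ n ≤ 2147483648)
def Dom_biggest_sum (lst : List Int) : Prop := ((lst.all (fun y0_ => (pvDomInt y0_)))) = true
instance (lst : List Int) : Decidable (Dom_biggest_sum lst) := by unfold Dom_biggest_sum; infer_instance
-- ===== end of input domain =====

-- B replaces A's single-pass flag/accumulator state machine by an index-and-slice loop over the
-- segments between consecutive zeros (objective: alternative decomposition, not faster).
-- Both Pythons raise TypeError on a negative (or non-int) element; Pre_ excludes those inputs.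

-- ===== PORT A =====
-- the scanning loop of A: state (current_sum, max_sum, zero_flag), branches in A's order
def pvLoopA : List Int → Int → Int → Bool → Int
  | [], _, mx, _ => mx
  | x :: xs, cur, mx, flag =>
    if x = 0 ∧ flag = false then pvLoopA xs cur mx true
    else if x = 0 ∧ flag = true then pvLoopA xs 0 (max mx cur) true
    else if flag = true then pvLoopA xs (cur + x) mx flag
    else pvLoopA xs cur mx flag

def biggest_sum (lst : List Int) : Int := pvLoopA lst 0 0 false

-- ===== PORT B =====
-- the while loop of Source B: '0 in rest' / 'rest.index(0)' → index?, slices rest[:j] and rest[j+1:]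
def pvBsLoop (rest : List Int) (best : Int) : Int :=
  match h : PySem.List.index? rest 0 with
  | none => best
  | some j =>
      pvBsLoop (PySem.List.slice rest (some ((j : Int) + 1)) none)
               (max best (PySem.List.slice rest none (some (j : Int))).sum)
termination_by rest.length
decreasing_by
  have hj := PySem.List.getElem_of_index?_eq_some h
  obtain ⟨hk, -, -⟩ := hj
  have : PySem.List.slice rest (some ((j : Int) + 1)) none = rest.drop (j + 1) := by
    have := PySem.List.slice_from_natCast rest (j + 1)
    simpa using this
  rw [this]
  simp [List.length_drop]
  omega

def biggest_sum_alt (lst : List Int) : Int :=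
  match PySem.List.index? lst 0 with
  | none => 0
  | some i => pvBsLoop (PySem.List.slice lst (some ((i : Int) + 1)) none) 0

-- ===== PRECONDITION & SPEC =====
-- Pre_ excludes exactly the inputs on which Python A raises TypeError: some element is negative
def Pre_biggest_sum (lst : List Int) : Prop := ∀ x ∈ lst, 0 ≤ x
instance (lst : List Int) : Decidable (Pre_biggest_sum lst) := by unfold Pre_biggest_sum; infer_instance
def pvWitness_biggest_sum : List Int := [0, 1, 2, 0, 5, 0]

def Spec_biggest_sum (lst : List Int) (out : Int) : Prop := out = biggest_sum_alt lst
instance (lst : List Int) (out : Int) : Decidable (Spec_biggest_sum lst out) := by unfold Spec_biggest_sum; infer_instance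

-- ===== CLAIM (what is proved, stated in full; the proofs are below) =====
def Claim_equal_biggest_sum : Prop := ∀ (lst : List Int), Dom_biggest_sum lst → Pre_biggest_sum lst → Spec_biggest_sum lst (biggest_sum lst)

-- ===== LEMMAS AND PROOFS =====

-- one unfolding of pvBsLoop with the slices rewritten to drop/take
theorem pvBsLoop_eq (rest : List Int) (best : Int) :
    pvBsLoop rest best =
      match PySem.List.index? rest 0 with
      | none => best
      | some j => pvBsLoop (rest.drop (j + 1)) (max best ((rest.take j).sum)) := by
  rw [pvBsLoop]
  cases h : PySem.List.index? rest 0 with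
  | none => rfl
  | some j =>
      have h1 : PySem.List.slice rest (some ((j : Int) + 1)) none = rest.drop (j + 1) := by
        have := PySem.List.slice_from_natCast rest (j + 1); simpa using this
      have h2 : PySem.List.slice rest none (some (j : Int)) = rest.take j :=
        PySem.List.slice_to_natCast rest j
      simp [h1, h2]

theorem biggest_sum_alt_eq (lst : List Int) :
    biggest_sum_alt lst =
      match PySem.List.index? lst 0 with
      | none => 0
      | some i => pvBsLoop (lst.drop (i + 1)) 0 := by
  unfold biggest_sum_alt
  cases h : PySem.List.index? lst 0 with
  | none => rfl
  | some i =>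
      have h1 : PySem.List.slice lst (some ((i : Int) + 1)) none = lst.drop (i + 1) := by
        have := PySem.List.slice_from_natCast lst (i + 1); simpa using this
      simp [h1]

-- the flag-true phase of A equals B's segment loop
theorem pvLoopA_true (xs : List Int) : ∀ cur mx : Int,
    pvLoopA xs cur mx true =
      match PySem.List.index? xs 0 with
      | none => mx
      | some j => pvBsLoop (xs.drop (j + 1)) (max mx (cur + (xs.take j).sum)) := by
  induction xs with
  | nil => intro cur mx; rfl
  | cons x xs ih =>
      intro cur mx
      by_cases hx : x = 0
      · subst hx
        have hidx : PySem.List.index? ((0 : Int) :: xs) 0 = some 0 := by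
          simp [PySem.List.index?_eq_idxOf?, List.idxOf?_cons]
        rw [hidx]
        show pvLoopA xs 0 (max mx cur) true = pvBsLoop xs (max mx (cur + 0))
        rw [ih, pvBsLoop_eq]
        cases h : PySem.List.index? xs 0 with
        | none => simp
        | some j => simp
      · have hidx : PySem.List.index? (x :: xs) 0 = (PySem.List.index? xs 0).map (· + 1) :=
          PySem.List.index?_cons_of_ne _ hx
        rw [show pvLoopA (x :: xs) cur mx true = pvLoopA xs (cur + x) mx true by
              simp [pvLoopA, hx]]
        rw [ih, hidx]
        cases h : PySem.List.index? xs 0 with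
        | none => rfl
        | some j =>
            simp [List.take_succ_cons, List.drop_succ_cons]
            ring_nf

-- the flag-false phase of A scans for the first zero, like B's outer index search
theorem pvLoopA_false (lst : List Int) :
    pvLoopA lst 0 0 false = biggest_sum_alt lst := by
  induction lst with
  | nil => simp [pvLoopA, biggest_sum_alt_eq]
  | cons x xs ih =>
      by_cases hx : x = 0
      · subst hx
        have hidx : PySem.List.index? ((0 : Int) :: xs) 0 = some 0 := by
          simp [PySem.List.index?_eq_idxOf?, List.idxOf?_cons]
        rw [biggest_sum_alt_eq, hidx]
        show pvLoopA xs 0 0 true = pvBsLoop xs 0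
        rw [pvLoopA_true, pvBsLoop_eq]
        cases h : PySem.List.index? xs 0 with
        | none => simp
        | some j => simp
      · have hidx : PySem.List.index? (x :: xs) 0 = (PySem.List.index? xs 0).map (· + 1) :=
          PySem.List.index?_cons_of_ne _ hx
        rw [show pvLoopA (x :: xs) 0 0 false = pvLoopA xs 0 0 false by
              simp [pvLoopA, hx]]
        rw [ih, biggest_sum_alt_eq, biggest_sum_alt_eq, hidx]
        cases h : PySem.List.index? xs 0 with
        | none => rfl
        | some j => simp [List.drop_succ_cons]

-- ===== VERDICT (by name: the statement is the Claim_ definition above) =====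
theorem biggest_sum_spec : Claim_equal_biggest_sum := by
  intro lst _ _
  unfold Spec_biggest_sum biggest_sum
  exact (pvLoopA_false lst)
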